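-- pv_equiv track=rewrite | github.com/jcolinpatrick/kryptos | scripts/e_explorer_03_w_separator.py | split_at_letter
-- ===== SOURCE A (Python) =====
-- def split_at_letter(text, sep_letter):
--     """Split text at positions of sep_letter, return alternating groups."""
--     positions = [i for i, c in enumerate(text) if c == sep_letter]
--     if not positions:
--         return text, "", 0
--
--     segments = []
--     prev = 0
--     for wp in positions:
--         if wp > prev:
--             segments.append(text[prev:wp])
--         prev = wp + 1
--     if prev < len(text):
--         segments.append(text[prev:])
--
--     group_a = ''.join(segments[i] for i in range(0, len(segments), 2))
--     group_b = ''.join(segments[i] for i in range(1, len(segments), 2))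
--     return group_a, group_b, len(positions)
-- ===== SOURCE B (Python) =====
-- def split_at_letter(text, sep_letter):
--     """Split text at positions of sep_letter, return alternating groups."""
--     group_a = []
--     group_b = []
--     cur = []
--     count = 0
--     toggle = False  # False: next nonempty segment goes to group_a
--     for c in text:
--         if c == sep_letter:
--             count += 1
--             if cur:
--                 if toggle:
--                     group_b.extend(cur)
--                 else:
--                     group_a.extend(cur)
--                 toggle = not toggle
--                 cur = []
--         else:
--             cur.append(c)
--     if cur:
--         if toggle:
--             group_b.extend(cur)
--         else:
--             group_a.extend(cur)
--     return ''.join(group_a), ''.join(group_b), count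
-- ===== Notes on version B (the rewrite author's own statement) =====
-- stated objective: simpler
-- what changed: Replaced A's three-phase pipeline (positions list, slice-built segments list, even/odd index interleaving joins) by a single toggle-driven pass over the characters that maintains the two groups, a count and the current segment directly.
import Mathlib
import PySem

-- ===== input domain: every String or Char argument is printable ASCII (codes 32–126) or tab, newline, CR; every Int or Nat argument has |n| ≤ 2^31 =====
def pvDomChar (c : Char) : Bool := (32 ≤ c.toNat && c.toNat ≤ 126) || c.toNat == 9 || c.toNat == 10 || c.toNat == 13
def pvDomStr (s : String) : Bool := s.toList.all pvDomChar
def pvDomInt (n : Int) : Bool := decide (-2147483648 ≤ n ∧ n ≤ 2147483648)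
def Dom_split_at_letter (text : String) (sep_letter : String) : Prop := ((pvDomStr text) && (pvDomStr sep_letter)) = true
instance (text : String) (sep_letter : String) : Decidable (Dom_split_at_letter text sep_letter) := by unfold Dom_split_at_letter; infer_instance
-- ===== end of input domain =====

-- B replaces A's positions-list + slice-built segments-list + even/odd index interleaving by a single
-- toggle-driven pass over the characters (objective: simpler one-pass decomposition, no speed claim).

-- 'c == sep_letter' in Python: the 1-char string c equals sep_letter
def pvIsSep (sep_letter : String) (c : Char) : Bool := [c] == sep_letter.toList

-- ===== PORT A =====
def split_at_letter (text : String) (sep_letter : String) : String × String × Int :=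
  let cs := text.toList
  let positions : List Int :=
    (PySem.List.enumerate cs).foldl
      (fun acc q => if pvIsSep sep_letter q.2 then acc ++ [q.1] else acc) []
  if positions = [] then (text, "", 0)
  else
    let st := positions.foldl
      (fun (s : List (List Char) × Int) wp =>
        (if wp > s.2 then s.1 ++ [PySem.List.slice cs (some s.2) (some wp)] else s.1, wp + 1))
      ([], 0)
    let segments :=
      if st.2 < (cs.length : Int) then st.1 ++ [PySem.List.slice cs (some st.2) none] else st.1
    let group_a := PySem.Chars.join []
      ((PySem.List.pyRange 0 (segments.length : Int) 2).map (fun i => PySem.List.pyGetD segments i []))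
    let group_b := PySem.Chars.join []
      ((PySem.List.pyRange 1 (segments.length : Int) 2).map (fun i => PySem.List.pyGetD segments i []))
    (String.ofList group_a, String.ofList group_b, (positions.length : Int))

-- ===== PORT B =====
-- one loop step of B: state (group_a, group_b, toggle, count, cur)
def pvAltStep (sep_letter : String)
    (st : List Char × List Char × Bool × Int × List Char) (c : Char) :
    List Char × List Char × Bool × Int × List Char :=
  match st with
  | (ga, gb, tog, cnt, cur) =>
    if pvIsSep sep_letter c then
      if cur = [] then (ga, gb, tog, cnt + 1, cur)
      else if tog then (ga, gb ++ cur, !tog, cnt + 1, [])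
      else (ga ++ cur, gb, !tog, cnt + 1, [])
    else (ga, gb, tog, cnt, cur ++ [c])

def split_at_letter_alt (text : String) (sep_letter : String) : String × String × Int :=
  match text.toList.foldl (pvAltStep sep_letter) ([], [], false, 0, []) with
  | (ga, gb, tog, cnt, cur) =>
    if cur = [] then (String.ofList ga, String.ofList gb, cnt)
    else if tog then (String.ofList ga, String.ofList (gb ++ cur), cnt)
    else (String.ofList (ga ++ cur), String.ofList gb, cnt)

-- ===== PRECONDITION & SPEC =====
def Spec_split_at_letter (text : String) (sep_letter : String) (out : String × String × Int) : Prop := out = split_at_letter_alt text sep_letter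
instance (text : String) (sep_letter : String) (out : String × String × Int) : Decidable (Spec_split_at_letter text sep_letter out) := by unfold Spec_split_at_letter; infer_instance

-- ===== CLAIM (what is proved, stated in full; the proofs are below) =====
def Claim_equal_split_at_letter : Prop := ∀ (text : String) (sep_letter : String), Dom_split_at_letter text sep_letter → Spec_split_at_letter text sep_letter (split_at_letter text sep_letter)

-- ===== LEMMAS AND PROOFS =====

-- nonempty maximal runs of non-separator characters, given the pending run `pend`
def pvRuns (sep : String) (pend : List Char) : List Char → List (List Char)
  | [] => if pend = [] then [] else [pend]
  | c :: t =>
    if pvIsSep sep c then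
      (if pend = [] then pvRuns sep [] t else pend :: pvRuns sep [] t)
    else pvRuns sep (pend ++ [c]) t

-- alternate distribution of the runs into the two groups, starting with the toggled group
def pvPlace (tog : Bool) : List (List Char) → List Char × List Char
  | [] => ([], [])
  | r :: R =>
    let q := pvPlace (!tog) R
    if tog then (q.1, r ++ q.2) else (r ++ q.1, q.2)

-- the separator positions of t, enumerated from s
def pvPosF (sep : String) (t : List Char) (s : Int) : List Int :=
  ((PySem.List.enumerate t s).filter (fun q => pvIsSep sep q.2)).map (·.1)

lemma pvPosF_nil (sep : String) (s : Int) : pvPosF sep [] s = [] := rfl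

lemma pvPosF_cons (sep : String) (c : Char) (t : List Char) (s : Int) :
    pvPosF sep (c :: t) s =
      (if pvIsSep sep c then [s] else []) ++ pvPosF sep t (s + 1) := by
  simp [pvPosF, PySem.List.enumerate_cons, List.filter_cons]
  split <;> simp

lemma pvPosF_length (sep : String) (t : List Char) (s : Int) :
    (pvPosF sep t s).length = t.countP (pvIsSep sep) := by
  induction t generalizing s with
  | nil => rfl
  | cons c t ih =>
    rw [pvPosF_cons, List.countP_cons]
    by_cases hc : pvIsSep sep c = true <;> simp [hc, ih]

lemma pvPosF_eq_nil_iff (sep : String) (t : List Char) (s : Int) :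
    pvPosF sep t s = [] ↔ ∀ c ∈ t, ¬ pvIsSep sep c = true := by
  constructor
  · intro h c hc hp
    have : t.countP (pvIsSep sep) = 0 := by rw [← pvPosF_length sep t s, h]; rfl
    rw [List.countP_eq_zero] at this
    exact this c hc hp
  · intro h
    have : (pvPosF sep t s).length = 0 := by
      rw [pvPosF_length, List.countP_eq_zero.2]
      intro c hc hp; exact h c hc hp
    exact List.length_eq_zero_iff.mp this

lemma pvRuns_no_sep (sep : String) (t : List Char) (pend : List Char)
    (h : ∀ c ∈ t, ¬ pvIsSep sep c = true) :
    pvRuns sep pend t = if pend ++ t = [] then [] else [pend ++ t] := by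
  induction t generalizing pend with
  | nil => simp [pvRuns]
  | cons c t ih =>
    have hc : ¬ pvIsSep sep c = true := h c (by simp)
    simp only [pvRuns, hc, if_false, Bool.false_eq_true]
    rw [ih (pend ++ [c]) (fun x hx => h x (by simp [hx]))]
    simp

-- A's segment-building loop, generalized: folding over the positions of the suffix t of `full`
-- (which starts at index s), with `pend` the pending characters full[prev:s], yields the runs.
lemma pvSegLoop (sep : String) (full : List Char) :
    ∀ (t : List Char) (prev s : Nat) (acc : List (List Char)) (pend : List Char),
      full.drop prev = pend ++ t → pend.length + prev = s →
      (let r := (pvPosF sep t (s : Int)).foldl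
          (fun (st : List (List Char) × Int) wp =>
            (if wp > st.2 then st.1 ++ [PySem.List.slice full (some st.2) (some wp)] else st.1,
             wp + 1))
          (acc, (prev : Int));
        if r.2 < (full.length : Int) then r.1 ++ [PySem.List.slice full (some r.2) none] else r.1)
      = acc ++ pvRuns sep pend t := by
  intro t
  induction t with
  | nil =>
    intro prev s acc pend hdrop hlen
    simp only [pvPosF_nil, List.foldl_nil]
    rw [List.append_nil] at hdrop
    have hiff : prev < full.length ↔ pend ≠ [] := by
      constructor
      · intro h hnil
        rw [hnil] at hdrop
        have := List.drop_eq_nil_iff.mp hdrop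
        omega
      · intro h
        by_contra hge
        have : full.drop prev = [] := List.drop_eq_nil_iff.mpr (by omega)
        rw [this] at hdrop; exact h hdrop.symm
    by_cases hp : pend = []
    · have : ¬ ((prev : Int) < (full.length : Int)) := by
        have := hiff.not.mpr (by simp [hp])
        omega
      simp [this, pvRuns, hp]
    · have : (prev : Int) < (full.length : Int) := by
        have := hiff.mpr hp
        omega
      simp only [this, if_true, pvRuns, hp, if_false]
      rw [PySem.List.slice_from_natCast, hdrop]
  | cons c t ih =>
    intro prev s acc pend hdrop hlen
    rw [pvPosF_cons]
    by_cases hc : pvIsSep sep c = true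
    · simp only [hc, if_true, List.singleton_append, List.foldl_cons]
      have hps : (s : Int) > (prev : Int) ↔ pend ≠ [] := by
        constructor
        · intro h hnil; rw [hnil] at hlen; simp at hlen; omega
        · intro h
          have : pend.length ≠ 0 := fun h0 => h (List.length_eq_zero_iff.mp h0)
          omega
      have hdropS : full.drop s = c :: t := by
        have : full.drop s = (full.drop prev).drop (s - prev) := by
          rw [List.drop_drop]; congr 1; omega
        rw [this, hdrop]
        have : s - prev = pend.length := by omega
        rw [this, List.drop_append]
        simp
      have hdropS1 : full.drop (s + 1) = t := by
        have : full.drop (s + 1) = (full.drop s).drop 1 := by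
          rw [List.drop_drop]
        rw [this, hdropS]; rfl
      by_cases hp : pend = []
      · have hgt : ¬ ((s : Int) > (prev : Int)) := by simp [hps, hp]
        simp only [hgt, if_false]
        have hcast : (s : Int) + 1 = ((s + 1 : Nat) : Int) := by push_cast; ring
        rw [hcast]
        have := ih (s + 1) (s + 1) acc [] (by simpa using hdropS1) (by simp)
        simp only at this
        rw [this]
        simp [pvRuns, hc, hp]
      · have hgt : (s : Int) > (prev : Int) := hps.mpr hp
        simp only [hgt, if_true]
        have hslice : PySem.List.slice full (some (prev : Int)) (some (s : Int)) = pend := by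
          rw [PySem.List.slice_natCast, hdrop]
          have : s - prev = pend.length := by omega
          rw [this, List.take_left]
        rw [hslice]
        have hcast : (s : Int) + 1 = ((s + 1 : Nat) : Int) := by push_cast; ring
        rw [hcast]
        have := ih (s + 1) (s + 1) (acc ++ [pend]) [] (by simpa using hdropS1) (by simp)
        simp only at this
        rw [this]
        simp [pvRuns, hc, hp]
    · simp only [hc, if_false, List.nil_append, Bool.false_eq_true]
      have hcast : (s : Int) + 1 = ((s + 1 : Nat) : Int) := by push_cast; ring
      rw [hcast]
      have := ih prev (s + 1) acc (pend ++ [c])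
        (by rw [hdrop]; simp) (by simp; omega)
      simp only at this
      rw [this]
      simp [pvRuns, hc]

-- A's even/odd-index joins compute pvPlace
lemma pvJoin_flatten (R : List (List Char)) :
    PySem.Chars.join [] R = R.flatten := by
  induction R with
  | nil => simp [PySem.Chars.join_nil]
  | cons a R ih =>
    cases R with
    | nil => simp [PySem.Chars.join_singleton]
    | cons b t => rw [PySem.Chars.join_cons_cons, ih]; simp

lemma pvRange_even (n : Nat) :
    PySem.List.pyRange 0 (n : Int) 2 = (List.range ((n + 1) / 2)).map (fun k => ((2 * k : Nat) : Int)) := by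
  rw [PySem.List.pyRange_of_pos 0 (n : Int) (by norm_num)]
  have hcnt : (if (0 : Int) < (n : Int) then (((n : Int) - 0 + 2 - 1) / 2).toNat else 0) = (n + 1) / 2 := by
    by_cases h : 0 < n
    · have : (0 : Int) < (n : Int) := by exact_mod_cast h
      rw [if_pos this]
      have : ((n : Int) - 0 + 2 - 1) = ((n + 1 : Nat) : Int) := by push_cast; ring
      rw [this]; omega
    · have hn : n = 0 := by omega
      subst hn; simp
  rw [hcnt]
  apply List.map_congr_left
  intro k _
  push_cast; ring

lemma pvRange_odd (n : Nat) :
    PySem.List.pyRange 1 (n : Int) 2 = (List.range (n / 2)).map (fun k => ((2 * k + 1 : Nat) : Int)) := by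
  rw [PySem.List.pyRange_of_pos 1 (n : Int) (by norm_num)]
  have hcnt : (if (1 : Int) < (n : Int) then (((n : Int) - 1 + 2 - 1) / 2).toNat else 0) = n / 2 := by
    by_cases h : 1 < n
    · have : (1 : Int) < (n : Int) := by exact_mod_cast h
      rw [if_pos this]
      have : ((n : Int) - 1 + 2 - 1) = ((n : Nat) : Int) := by ring
      rw [this]; omega
    · interval_cases n <;> simp
  rw [hcnt]
  apply List.map_congr_left
  intro k _
  push_cast; ring

lemma pvPlace_eq_evens_odds :
    ∀ (R : List (List Char)),
      ((List.range ((R.length + 1) / 2)).map (fun k => R.getD (2 * k) [])).flatten = (pvPlace false R).1 ∧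
      ((List.range (R.length / 2)).map (fun k => R.getD (2 * k + 1) [])).flatten = (pvPlace false R).2 := by
  have key : ∀ (n : Nat) (R : List (List Char)), R.length ≤ n →
      ((List.range ((R.length + 1) / 2)).map (fun k => R.getD (2 * k) [])).flatten = (pvPlace false R).1 ∧
      ((List.range (R.length / 2)).map (fun k => R.getD (2 * k + 1) [])).flatten = (pvPlace false R).2 := by
    intro n
    induction n using Nat.strong_induction_on with
    | _ n ih =>
      intro R hle
      match R with
      | [] => simp [pvPlace]
      | [a] => simp [pvPlace]
      | a :: b :: t =>
        have hlt : t.length < n := by simp at hle; omega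
        obtain ⟨ih1, ih2⟩ := ih t.length hlt t le_rfl
        have hlen1 : ((a :: b :: t).length + 1) / 2 = (t.length + 1) / 2 + 1 := by simp; omega
        have hlen2 : (a :: b :: t).length / 2 = t.length / 2 + 1 := by simp; omega
        constructor
        · rw [hlen1, List.range_succ_eq_map]
          simp only [List.map_cons, List.map_map, List.flatten_cons]
          have : ((List.range ((t.length + 1) / 2)).map ((fun k => (a :: b :: t).getD (2 * k) []) ∘ Nat.succ))
              = (List.range ((t.length + 1) / 2)).map (fun k => t.getD (2 * k) []) := by
            apply List.map_congr_left; intro k _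
            simp [Nat.mul_succ, List.getD]
          rw [this, ih1]
          simp [pvPlace]
        · rw [hlen2, List.range_succ_eq_map]
          simp only [List.map_cons, List.map_map, List.flatten_cons]
          have : ((List.range (t.length / 2)).map ((fun k => (a :: b :: t).getD (2 * k + 1) []) ∘ Nat.succ))
              = (List.range (t.length / 2)).map (fun k => t.getD (2 * k + 1) []) := by
            apply List.map_congr_left; intro k _
            simp [Nat.mul_succ, List.getD]
          rw [this, ih2]
          simp [pvPlace]
  intro R
  exact key R.length R le_rfl

-- B's loop, generalized over the state
def pvFinish (st : List Char × List Char × Bool × Int × List Char) :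
    List Char × List Char × Int :=
  match st with
  | (ga, gb, tog, cnt, cur) =>
    if cur = [] then (ga, gb, cnt)
    else if tog then (ga, gb ++ cur, cnt)
    else (ga ++ cur, gb, cnt)

lemma pvAltLoop (sep : String) :
    ∀ (t : List Char) (ga gb : List Char) (tog : Bool) (cnt : Int) (cur : List Char),
      pvFinish (t.foldl (pvAltStep sep) (ga, gb, tog, cnt, cur)) =
        (ga ++ (pvPlace tog (pvRuns sep cur t)).1,
         gb ++ (pvPlace tog (pvRuns sep cur t)).2,
         cnt + (t.countP (pvIsSep sep) : Int)) := by
  intro t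
  induction t with
  | nil =>
    intro ga gb tog cnt cur
    by_cases hp : cur = []
    · simp [pvFinish, hp, pvRuns, pvPlace]
    · cases tog <;> simp [pvFinish, hp, pvRuns, pvPlace]
  | cons c t ih =>
    intro ga gb tog cnt cur
    by_cases hc : pvIsSep sep c = true
    · by_cases hp : cur = []
      · simp only [List.foldl_cons, pvAltStep, hc, if_true, hp]
        rw [ih]
        simp [pvRuns, hc]
        omega
      · cases tog
        · simp only [List.foldl_cons, pvAltStep, hc, if_true, hp, if_false, Bool.not_false]
          rw [ih]
          simp [pvRuns, hc, hp, pvPlace]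
          omega
        · simp only [List.foldl_cons, pvAltStep, hc, if_true, hp, if_false, Bool.not_true]
          rw [ih]
          simp [pvRuns, hc, hp, pvPlace]
          omega
    · simp only [List.foldl_cons, pvAltStep, hc, if_false, Bool.false_eq_true]
      rw [ih]
      simp [pvRuns, hc]

theorem split_at_letter_spec : Claim_equal_split_at_letter := by
  unfold Claim_equal_split_at_letter
  intro text sep _
  unfold Spec_split_at_letter
  -- B's value
  have hB : split_at_letter_alt text sep =
      (String.ofList (pvPlace false (pvRuns sep [] text.toList)).1,
       String.ofList (pvPlace false (pvRuns sep [] text.toList)).2,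
       (text.toList.countP (pvIsSep sep) : Int)) := by
    unfold split_at_letter_alt
    have h := pvAltLoop sep text.toList [] [] false 0 []
    rcases hst : text.toList.foldl (pvAltStep sep) ([], [], false, 0, []) with ⟨ga, gb, tog, cnt, cur⟩
    rw [hst] at h
    show (if cur = [] then (String.ofList ga, String.ofList gb, cnt)
      else if tog = true then (String.ofList ga, String.ofList (gb ++ cur), cnt)
      else (String.ofList (ga ++ cur), String.ofList gb, cnt)) = _
    by_cases hp : cur = []
    · simp only [pvFinish, hp, if_true] at h
      rw [Prod.mk.injEq, Prod.mk.injEq] at h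
      obtain ⟨h1, h2, h3⟩ := h
      simp only [List.nil_append] at h1 h2
      rw [if_pos hp, h1, h2, h3]
      norm_num
    · cases tog
      · simp only [pvFinish, hp, if_false, Bool.false_eq_true] at h
        rw [Prod.mk.injEq, Prod.mk.injEq] at h
        obtain ⟨h1, h2, h3⟩ := h
        simp only [List.nil_append] at h1 h2
        rw [if_neg hp, h1, h2, h3]
        norm_num
      · simp only [pvFinish, hp, if_false, if_true] at h
        rw [Prod.mk.injEq, Prod.mk.injEq] at h
        obtain ⟨h1, h2, h3⟩ := h
        simp only [List.nil_append] at h1 h2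
        rw [if_neg hp, h1, h2, h3]
        norm_num
  rw [hB]
  -- A's value
  unfold split_at_letter
  simp only
  have hposs : (PySem.List.enumerate text.toList).foldl
      (fun acc q => if pvIsSep sep q.2 then acc ++ [q.1] else acc) [] = pvPosF sep text.toList 0 := by
    rw [PySem.List.foldl_append_if (fun q => pvIsSep sep q.2) (·.1) (PySem.List.enumerate text.toList) []]
    rfl
  rw [hposs]
  by_cases hnil : pvPosF sep text.toList 0 = []
  · rw [if_pos hnil]
    have hall := (pvPosF_eq_nil_iff sep text.toList 0).mp hnil
    have hruns := pvRuns_no_sep sep text.toList [] (by simpa using hall)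
    simp only [List.nil_append] at hruns
    have hcount : text.toList.countP (pvIsSep sep) = 0 :=
      List.countP_eq_zero.2 (fun c hc => hall c hc)
    rw [hcount]
    by_cases hcs0 : text.toList = []
    · rw [if_pos hcs0] at hruns
      rw [hruns]
      have htext : text = "" := by
        calc text = String.ofList text.toList := String.ofList_toList.symm
        _ = String.ofList [] := by rw [hcs0]
        _ = "" := rfl
      rw [htext]
      rfl
    · rw [if_neg hcs0] at hruns
      rw [hruns]
      have h1 : (pvPlace false [text.toList]).1 = text.toList := by
        simp [pvPlace]
      have h2 : (pvPlace false [text.toList]).2 = [] := by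
        simp [pvPlace]
      rw [h1, h2, String.ofList_toList]
      rfl
  · rw [if_neg hnil]
    have hseg := pvSegLoop sep text.toList text.toList 0 0 [] [] (by simp) (by simp)
    simp only [Nat.cast_zero, List.nil_append] at hseg
    rw [hseg]
    obtain ⟨hev, hod⟩ := pvPlace_eq_evens_odds (pvRuns sep [] text.toList)
    have hevm : (PySem.List.pyRange 0 ((pvRuns sep [] text.toList).length : Int) 2).map
        (fun i => PySem.List.pyGetD (pvRuns sep [] text.toList) i []) =
        (List.range (((pvRuns sep [] text.toList).length + 1) / 2)).map
          (fun k => (pvRuns sep [] text.toList).getD (2 * k) []) := by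
      rw [pvRange_even, List.map_map]
      apply List.map_congr_left
      intro k _
      simp only [Function.comp_apply, PySem.List.pyGetD_natCast]
    have hodm : (PySem.List.pyRange 1 ((pvRuns sep [] text.toList).length : Int) 2).map
        (fun i => PySem.List.pyGetD (pvRuns sep [] text.toList) i []) =
        (List.range ((pvRuns sep [] text.toList).length / 2)).map
          (fun k => (pvRuns sep [] text.toList).getD (2 * k + 1) []) := by
      rw [pvRange_odd, List.map_map]
      apply List.map_congr_left
      intro k _
      simp only [Function.comp_apply, PySem.List.pyGetD_natCast]
    rw [hevm, hodm, pvJoin_flatten, pvJoin_flatten, hev, hod, pvPosF_length]
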